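-- pv_equiv track=rewrite | github.com/RELabUU/LCDTrace | src/d03_processing/calculateQueryQuality.py | findTermPairFrequencies
-- ===== SOURCE A (Python) =====
-- def findTermPairFrequencies(termPairs, docCollection):
--     termPairFrequencies = {}
--     for termPair in termPairs:
--         termPairCount = 0
--         for document in docCollection:
--             if (isinstance(document, list)):
--                 if all(i in document for i in termPair):
--                     termPairCount = termPairCount + 1
--         termPairFrequencies[termPair] = termPairCount
--     return(termPairFrequencies)
-- ===== SOURCE B (Python) =====
-- def findTermPairFrequencies(termPairs, docCollection):
--     # Inverted index: term -> list of doc ids containing it (built in one pass),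
--     # then each pair's frequency is the size of the intersection of two posting lists.
--     index = {}
--     for i, document in enumerate(docCollection):
--         if isinstance(document, list):
--             for term in set(document):
--                 index.setdefault(term, []).append(i)
--     termPairFrequencies = {}
--     for termPair in termPairs:
--         postingsA = index.get(termPair[0], [])
--         postingsB = set(index.get(termPair[1], []))
--         termPairFrequencies[termPair] = sum(1 for i in postingsA if i in postingsB)
--     return termPairFrequencies
-- ===== Notes on version B (the rewrite author's own statement) =====
-- stated objective: faster
-- what changed: B builds an inverted index (term -> posting list of doc ids) in one pass over the collection and computes each pair's frequency as the intersection size of two posting lists, instead of rescanning every document for every pair.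
import Mathlib
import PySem

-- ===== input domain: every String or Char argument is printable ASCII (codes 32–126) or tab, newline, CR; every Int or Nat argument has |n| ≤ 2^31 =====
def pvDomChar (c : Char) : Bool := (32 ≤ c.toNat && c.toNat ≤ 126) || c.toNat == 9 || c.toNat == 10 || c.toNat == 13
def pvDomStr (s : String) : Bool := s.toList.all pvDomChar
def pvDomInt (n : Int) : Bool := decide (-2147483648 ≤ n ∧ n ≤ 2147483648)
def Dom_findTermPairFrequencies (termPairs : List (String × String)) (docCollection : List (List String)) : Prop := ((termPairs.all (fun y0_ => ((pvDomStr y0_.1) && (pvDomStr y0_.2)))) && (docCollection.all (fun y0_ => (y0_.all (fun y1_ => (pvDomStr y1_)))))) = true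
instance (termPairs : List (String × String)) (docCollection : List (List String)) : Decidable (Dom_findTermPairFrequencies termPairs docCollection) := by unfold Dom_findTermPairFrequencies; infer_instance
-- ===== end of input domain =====

-- B replaces A's per-pair scan of every document by an inverted index (term -> posting list of
-- doc ids) built once, counting each pair via a posting-list intersection; objective: faster.

-- ===== PORT A =====
-- literal port of A; the `isinstance(document, list)` test is always True on the typed input
-- List (List String), so it is omitted.
def findTermPairFrequencies (termPairs : List (String × String)) (docCollection : List (List String)) : List (String × String × Int) :=
  ((termPairs.foldl (fun d termPair =>
      d.insert termPair
        (docCollection.foldl (fun c document =>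
            if termPair.1 ∈ document ∧ termPair.2 ∈ document then c + 1 else c) (0 : Int)))
    PySem.Dict.empty).items).map (fun q => (q.1.1, q.1.2, q.2))

-- ===== PORT B =====
-- 'for i, document in enumerate(docCollection): for term in set(document): index.setdefault(term, []).append(i)'
def pvIndex (docCollection : List (List String)) : PySem.Dict String (List Int) :=
  (PySem.List.enumerate docCollection 0).foldl
    (fun d pr => (PySem.Set.ofList pr.2).foldl (fun d term => d.modify term [] (· ++ [pr.1])) d)
    PySem.Dict.empty

def findTermPairFrequencies_alt (termPairs : List (String × String)) (docCollection : List (List String)) : List (String × String × Int) :=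
  let index := pvIndex docCollection
  ((termPairs.foldl (fun d termPair =>
      let postingsA := index.getD termPair.1 []
      let postingsB : PySem.Set Int := PySem.Set.ofList (index.getD termPair.2 [])
      d.insert termPair ((postingsA.filter (fun i => PySem.Set.contains postingsB i)).length : Int))
    PySem.Dict.empty).items).map (fun q => (q.1.1, q.1.2, q.2))

-- ===== PRECONDITION & SPEC =====
def Spec_findTermPairFrequencies (termPairs : List (String × String)) (docCollection : List (List String)) (out : List (String × String × Int)) : Prop := out = findTermPairFrequencies_alt termPairs docCollection
instance (termPairs : List (String × String)) (docCollection : List (List String)) (out : List (String × String × Int)) : Decidable (Spec_findTermPairFrequencies termPairs docCollection out) := by unfold Spec_findTermPairFrequencies; infer_instance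

-- ===== CLAIM (what is proved, stated in full; the proofs are below) =====
def Claim_equal_findTermPairFrequencies : Prop := ∀ (termPairs : List (String × String)) (docCollection : List (List String)), Dom_findTermPairFrequencies termPairs docCollection → Spec_findTermPairFrequencies termPairs docCollection (findTermPairFrequencies termPairs docCollection)

-- ===== LEMMAS AND PROOFS =====

-- in a duplicate-free list, filtering for one element yields that element (once) or nothing
theorem pv_filter_beq_nodup (s : List String) (hs : s.Nodup) (t : String) :
    s.filter (fun x => x == t) = if t ∈ s then [t] else [] := by
  rw [List.filter_beq]
  split_ifs with h
  · rw [List.count_eq_one_of_mem hs h]; rfl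
  · simp [List.count_eq_zero_of_not_mem h]

theorem pv_flatMap_if_singleton (l : List (Int × List String)) (p : List String → Bool) :
    l.flatMap (fun pr => if p pr.2 then [pr.1] else [])
      = (l.filter (fun pr => p pr.2)).map (fun pr => pr.1) := by
  induction l with
  | nil => rfl
  | cons h tl ih => by_cases hp : p h.2 <;> simp [hp, ih]

-- the inverted index characterized: posting list of t = ids of the documents containing t
theorem pvIndex_getD (docCollection : List (List String)) (t : String) :
    (pvIndex docCollection).getD t []
      = ((PySem.List.enumerate docCollection 0).filter (fun pr => decide (t ∈ pr.2))).map (fun pr => pr.1) := by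
  unfold pvIndex
  have hinner : (fun (d : PySem.Dict String (List Int)) (pr : Int × List String) =>
      (PySem.Set.ofList pr.2).foldl (fun d term => d.modify term [] (· ++ [pr.1])) d)
        = (fun d pr => ((PySem.Set.ofList pr.2).map (fun term => (term, pr.1))).foldl
            (fun d p => d.modify p.1 [] (· ++ [p.2])) d) := by
    funext d pr; rw [List.foldl_map]
  rw [hinner, ← List.foldl_flatMap, PySem.Dict.getD_foldl_modify_append]
  simp only [PySem.Dict.getD_empty, List.nil_append, List.filter_flatMap, List.map_flatMap]
  have hblock : ∀ pr : Int × List String,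
      ((((PySem.Set.ofList pr.2).map (fun term => (term, pr.1))).filter (fun p => p.1 == t)).map (fun p => p.2))
        = (if decide (t ∈ pr.2) then [pr.1] else []) := by
    intro pr
    rw [List.filter_map]
    have hf : ((PySem.Set.ofList pr.2).filter (fun term => term == t)) = if t ∈ PySem.Set.ofList pr.2 then [t] else [] :=
      pv_filter_beq_nodup _ (PySem.Set.nodup_ofList pr.2) t
    simp only [Function.comp_def] at hf ⊢
    rw [hf]
    by_cases h : t ∈ pr.2 <;> simp [PySem.Set.mem_ofList, h]
  rw [List.flatMap_congr (fun pr _ => hblock pr)]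
  exact pv_flatMap_if_singleton _ (fun d => decide (t ∈ d))

-- elements of an enumeration are determined by their index
theorem pv_enumerate_fst_inj (docCollection : List (List String)) (pr pr' : Int × List String)
    (h : pr ∈ PySem.List.enumerate docCollection 0) (h' : pr' ∈ PySem.List.enumerate docCollection 0)
    (hfst : pr.1 = pr'.1) : pr = pr' := by
  rw [PySem.List.mem_enumerate_iff] at h h'
  obtain ⟨k, hk, rfl⟩ := h
  obtain ⟨k', hk', rfl⟩ := h'
  simp only [Int.zero_add] at hfst ⊢
  have : k = k' := by exact_mod_cast hfst
  subst this; rfl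

-- intersection of two posting lists counts the documents containing both terms
theorem pv_count_inter (docCollection : List (List String)) (a b : String) :
    ((((PySem.List.enumerate docCollection 0).filter (fun pr => decide (a ∈ pr.2))).map (fun pr => pr.1)).filter
        (fun i => PySem.Set.contains (PySem.Set.ofList
          (((PySem.List.enumerate docCollection 0).filter (fun pr => decide (b ∈ pr.2))).map (fun pr => pr.1))) i)).length
      = docCollection.countP (fun document => decide (a ∈ document ∧ b ∈ document)) := by
  set e := PySem.List.enumerate docCollection 0 with he
  have hmemb : ∀ pr ∈ e,
      (PySem.Set.contains (PySem.Set.ofList ((e.filter (fun pr => decide (b ∈ pr.2))).map (fun pr => pr.1))) pr.1)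
        = decide (b ∈ pr.2) := by
    intro pr hpr
    rw [PySem.Set.contains_eq_decide]
    have : (pr.1 ∈ PySem.Set.ofList ((e.filter (fun pr => decide (b ∈ pr.2))).map (fun pr => pr.1))) ↔ b ∈ pr.2 := by
      rw [PySem.Set.mem_ofList]
      constructor
      · intro h
        obtain ⟨pr', hpr', hfst⟩ := List.mem_map.mp h
        have hb : decide (b ∈ pr'.2) = true := (List.mem_filter.mp hpr').2
        have := pv_enumerate_fst_inj docCollection pr pr' hpr (List.mem_of_mem_filter hpr') hfst.symm
        subst this; exact of_decide_eq_true hb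
      · intro h
        exact List.mem_map.mpr ⟨pr, List.mem_filter.mpr ⟨hpr, by simpa using h⟩, rfl⟩
    simp [this]
  rw [List.filter_map]
  have hcongr : (e.filter (fun pr => decide (a ∈ pr.2))).filter
        ((fun i => PySem.Set.contains (PySem.Set.ofList ((e.filter (fun pr => decide (b ∈ pr.2))).map (fun pr => pr.1))) i) ∘ (fun pr => pr.1))
      = (e.filter (fun pr => decide (a ∈ pr.2))).filter (fun pr => decide (b ∈ pr.2)) := by
    apply List.filter_congr
    intro pr hpr
    exact hmemb pr (List.mem_of_mem_filter hpr)
  rw [hcongr, List.filter_filter, List.length_map, ← List.countP_eq_length_filter]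
  have hsnd : docCollection.countP (fun document => decide (a ∈ document ∧ b ∈ document))
      = (e.map (fun pr => pr.2)).countP (fun document => decide (a ∈ document ∧ b ∈ document)) := by
    rw [he, PySem.List.map_snd_enumerate]
  rw [hsnd, List.countP_map]
  apply List.countP_congr
  intro pr _
  simp [and_comm]

theorem findTermPairFrequencies_spec : Claim_equal_findTermPairFrequencies := by
  intro termPairs docCollection _
  unfold Spec_findTermPairFrequencies findTermPairFrequencies findTermPairFrequencies_alt
  simp only []
  congr 2
  apply PySem.List.foldl_congr_mem
  intro d p _
  congr 1
  rw [PySem.List.foldl_ite_add_one, pvIndex_getD, pvIndex_getD, pv_count_inter]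
  simp
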